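-- pv_equiv track=rewrite | github.com/arnaualbert/python | ej_sol/12-while/while-loop-exercises/e18.py | make_heights_list
-- ===== SOURCE A (Python) =====
-- def make_heights_list(max_height: int) -> list[int]:
--     """Returns a list with the heights of each row in the pyramid."""
--
--     result: list[int] = []
--
--     # Ascending part
--     start: int = 1
--     end:   int = max_height
--
--     iter:     int  = start
--     finished: bool = (iter > end)
--
--     while (not finished):
--
--         result.append(iter)
--
--         iter     = iter + 1
--         finished = (iter > end)
--
--
--     # Descending part
--     start = max_height - 1
--     end   = 1
--
--     iter     = start
--     finished = (iter < end)
--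
--     while (not finished):
--
--         result.append(iter)
--
--         iter     = iter - 1
--         finished = (iter < end)
--
--     return result
-- ===== SOURCE B (Python) =====
-- def make_heights_list(max_height: int) -> list[int]:
--     """Returns a list with the heights of each row in the pyramid."""
--     return [max_height - abs(i - (max_height - 1)) for i in range(2 * max_height - 1)]
-- ===== Notes on version B (the rewrite author's own statement) =====
-- stated objective: simpler
-- what changed: Replaced the two separate while loops (ascending then descending) by a single comprehension over range(2*max_height-1) using the closed-form height max_height - abs(i - (max_height - 1)).
import Mathlib
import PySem

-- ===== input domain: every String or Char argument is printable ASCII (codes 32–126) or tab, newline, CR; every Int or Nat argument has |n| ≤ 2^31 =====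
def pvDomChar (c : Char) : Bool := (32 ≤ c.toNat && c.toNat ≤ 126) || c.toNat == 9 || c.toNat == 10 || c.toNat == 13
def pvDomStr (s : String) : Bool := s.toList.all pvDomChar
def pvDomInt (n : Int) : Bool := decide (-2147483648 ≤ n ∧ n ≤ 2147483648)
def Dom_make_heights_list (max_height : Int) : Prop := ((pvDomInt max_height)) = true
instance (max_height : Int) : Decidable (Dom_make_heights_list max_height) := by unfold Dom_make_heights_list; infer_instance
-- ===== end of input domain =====

-- B replaces A's two while loops by one comprehension using the closed-form height
-- max_height - |i - (max_height - 1)|; objective: simpler.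

-- ===== PORT A =====
-- the first while loop: append iter while iter <= e, iter += 1
def pvAscLoop (iter e : Int) : List Int :=
  if iter > e then [] else iter :: pvAscLoop (iter + 1) e
termination_by (e + 1 - iter).toNat
decreasing_by omega

-- the second while loop: append iter while iter >= 1, iter -= 1
def pvDescLoop (iter : Int) : List Int :=
  if iter < 1 then [] else iter :: pvDescLoop (iter - 1)
termination_by iter.toNat
decreasing_by omega

def make_heights_list (max_height : Int) : List Int :=
  pvAscLoop 1 max_height ++ pvDescLoop (max_height - 1)

-- ===== PORT B =====
def make_heights_list_alt (max_height : Int) : List Int :=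
  (PySem.List.pyRange 0 (2 * max_height - 1) 1).map
    (fun i => max_height - |i - (max_height - 1)|)

-- ===== PRECONDITION & SPEC =====
def Spec_make_heights_list (max_height : Int) (out : List Int) : Prop := out = make_heights_list_alt max_height
instance (max_height : Int) (out : List Int) : Decidable (Spec_make_heights_list max_height out) := by unfold Spec_make_heights_list; infer_instance

-- ===== CLAIM (what is proved, stated in full; the proofs are below) =====
def Claim_equal_make_heights_list : Prop := ∀ (max_height : Int), Dom_make_heights_list max_height → Spec_make_heights_list max_height (make_heights_list max_height)

-- ===== LEMMAS AND PROOFS =====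

theorem pvAscLoop_eq (n : Nat) : ∀ (a b : Int), (b + 1 - a).toNat = n →
    pvAscLoop a b = (List.range n).map (fun (k : Nat) => a + (k : Int)) := by
  induction n with
  | zero =>
    intro a b h
    rw [pvAscLoop]
    simp only [List.range_zero, List.map_nil]
    rw [if_pos (by omega)]
  | succ n ih =>
    intro a b h
    rw [pvAscLoop, if_neg (by omega)]
    rw [List.range_succ_eq_map]
    simp only [List.map_cons, List.map_map]
    refine congrArg₂ _ (by omega) ?_
    rw [ih (a + 1) b (by omega)]
    apply List.map_congr_left
    intro k _
    simp only [Function.comp]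
    push_cast
    ring

theorem pvDescLoop_eq (n : Nat) : ∀ (i : Int), i.toNat = n →
    pvDescLoop i = (List.range n).map (fun (k : Nat) => i - (k : Int)) := by
  induction n with
  | zero =>
    intro i h
    rw [pvDescLoop]
    simp only [List.range_zero, List.map_nil]
    rw [if_pos (by omega)]
  | succ n ih =>
    intro i h
    rw [pvDescLoop, if_neg (by omega)]
    rw [List.range_succ_eq_map]
    simp only [List.map_cons, List.map_map]
    refine congrArg₂ _ (by omega) ?_
    rw [ih (i - 1) (by omega)]
    apply List.map_congr_left
    intro k _
    simp only [Function.comp]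
    push_cast
    ring

theorem make_heights_list_spec : Claim_equal_make_heights_list := by
  intro m _
  unfold Spec_make_heights_list make_heights_list make_heights_list_alt
  rw [PySem.List.pyRange_one, List.map_map]
  by_cases hm : m ≤ 0
  · rw [pvAscLoop, if_pos (by omega), pvDescLoop, if_pos (by omega),
      show (2 * m - 1 - 0).toNat = 0 from by omega]
    rfl
  · have hm' : 0 < m := by omega
    set n := m.toNat with hn
    have hN : (2 * m - 1 - 0).toNat = n + (n - 1) := by omega
    rw [hN, List.range_add, List.map_append, List.map_map]
    rw [pvAscLoop_eq n 1 m (by omega), pvDescLoop_eq (n - 1) (m - 1) (by omega)]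
    refine congrArg₂ _ ?_ ?_
    · apply List.map_congr_left
      intro k hk
      have hk' : k < n := List.mem_range.mp hk
      simp only [Function.comp]
      have : |(0 : Int) + (k : Int) - (m - 1)| = (m - 1) - k := by
        rw [abs_of_nonpos (by omega)]; ring
      rw [this]; ring
    · apply List.map_congr_left
      intro k hk
      have hk' : k < n - 1 := List.mem_range.mp hk
      simp only [Function.comp]
      have : |(0 : Int) + ((n + k : Nat) : Int) - (m - 1)| = (k : Int) + 1 := by
        rw [abs_of_nonneg (by push_cast; omega)]
        push_cast; omega
      rw [this]
      ring
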